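-- pv_equiv track=rewrite | github.com/Lizano1210/Intro-Taller | Lab Listas/funciones.py | listaRN
-- ===== SOURCE A (Python) =====
-- recuperadosDonantes=["303500621","101110218","412340987","267893456","154328765","534561234","187674329","265437654","243214321","187654321","187659870","687659870","887659870","945659823"]
--
-- def listaRN(oplistaRN):
--     """
--     Funcionamiento: Filtra la lista de donantes según la provincia.
--     Entradas:
--     - oplistaRN (int): Código de provincia (1 a 9)
--     Salidas:
--     - listaRNAux (list): Lista de cédulas correspondientes a la provincia
--     - contador (int): Cantidad de donantes de esa provincia
--     - provincia (str): Nombre de la provincia o categoría especial correspondiente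
--     """
--     listaRNAux = []
--     contador = 0
--     provincia = ''
--     if oplistaRN == 1:
--         provincia = 'San José'
--         for i in recuperadosDonantes:
--             if i[0] == '1':
--                 listaRNAux.append(i)
--                 contador += 1
--     if oplistaRN == 2:
--         provincia = 'Alajuela'
--         for i in recuperadosDonantes:
--             if i[0] == '2':
--                 listaRNAux.append(i)
--                 contador += 1
--     if oplistaRN == 3:
--         provincia = 'Cartago'
--         for i in recuperadosDonantes:
--             if i[0] == '3':
--                 listaRNAux.append(i)
--                 contador += 1
--     if oplistaRN == 4:
--         provincia = 'Heredia'
--         for i in recuperadosDonantes: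
--             if i[0] == '4':
--                 listaRNAux.append(i)
--                 contador += 1
--     if oplistaRN == 5:
--         provincia = 'Guanacaste'
--         for i in recuperadosDonantes:
--             if i[0] == '5':
--                 listaRNAux.append(i)
--                 contador += 1
--     if oplistaRN == 6:
--         provincia = 'Puntarenas'
--         for i in recuperadosDonantes:
--             if i[0] == '6':
--                 listaRNAux.append(i)
--                 contador += 1
--     if oplistaRN == 7:
--         provincia = 'Limón'
--         for i in recuperadosDonantes:
--             if i[0] == '7':
--                 listaRNAux.append(i)
--                 contador += 1
--     if oplistaRN == 8:
--         provincia = 'nacionalizados o naturalizados'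
--         for i in recuperadosDonantes:
--             if i[0] == '8':
--                 listaRNAux.append(i)
--                 contador += 1
--     if oplistaRN == 9:
--         provincia = 'de partida especial de nacimientos'
--         for i in recuperadosDonantes:
--             if i[0] == '9':
--                 listaRNAux.append(i)
--                 contador += 1
--
--     return listaRNAux, contador, provincia
-- ===== SOURCE B (Python) =====
-- recuperadosDonantes=["303500621","101110218","412340987","267893456","154328765","534561234","187674329","265437654","243214321","187654321","187659870","687659870","887659870","945659823"]
--
-- PROVINCIAS = {1: 'San José', 2: 'Alajuela', 3: 'Cartago', 4: 'Heredia',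
--               5: 'Guanacaste', 6: 'Puntarenas', 7: 'Limón',
--               8: 'nacionalizados o naturalizados',
--               9: 'de partida especial de nacimientos'}
--
-- # Index the fixed donor list ONCE, grouping cedulas by their leading digit;
-- # each call is then a pair of dictionary lookups, no scan of the list at all.
-- _BUCKETS = {}
-- for _ced in recuperadosDonantes:
--     _BUCKETS.setdefault(_ced[0], []).append(_ced)
--
-- def listaRN(oplistaRN):
--     provincia = PROVINCIAS.get(oplistaRN, '')
--     if provincia:
--         listaRNAux = list(_BUCKETS.get(str(oplistaRN), []))
--     else:
--         listaRNAux = []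
--     return listaRNAux, len(listaRNAux), provincia
-- ===== Notes on version B (the rewrite author's own statement) =====
-- stated objective: alternative
-- what changed: Instead of nine per-call conditional scans, B groups the fixed donor list by leading digit into a bucket index built once at module load; each call is just two dictionary lookups (province name and precomputed bucket) with len() for the count.
import Mathlib
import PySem

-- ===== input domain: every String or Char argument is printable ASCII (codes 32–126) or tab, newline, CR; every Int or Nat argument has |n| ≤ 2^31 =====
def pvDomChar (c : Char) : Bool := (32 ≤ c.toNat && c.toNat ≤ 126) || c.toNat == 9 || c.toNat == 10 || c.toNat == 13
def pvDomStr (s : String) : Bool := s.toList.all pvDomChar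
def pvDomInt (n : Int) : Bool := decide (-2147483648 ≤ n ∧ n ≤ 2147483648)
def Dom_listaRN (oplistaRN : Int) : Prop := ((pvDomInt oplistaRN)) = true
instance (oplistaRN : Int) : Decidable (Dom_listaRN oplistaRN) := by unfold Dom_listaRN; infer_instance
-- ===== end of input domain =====

-- B replaces A's nine copy-pasted per-call scans by a bucket index (leading digit → cedulas)
-- built once from the fixed list, so each call is two dictionary lookups; objective: alternative.

def recuperadosDonantes : List String :=
  ["303500621","101110218","412340987","267893456","154328765","534561234","187674329",
   "265437654","243214321","187654321","187659870","687659870","887659870","945659823"]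

-- ===== PORT A =====
-- one if-block of A: provincia is set, then the list is scanned appending matches and counting
def pvBlockA (digit : Char) (name : String) (s : List String × Int × String) : List String × Int × String :=
  let t := recuperadosDonantes.foldl
    (fun (t : List String × Int) i =>
      if PySem.Str.pyGet? i 0 = some digit then (t.1 ++ [i], t.2 + 1) else t)
    (s.1, s.2.1)
  (t.1, t.2, name)

def listaRN (oplistaRN : Int) : List String × Int × String :=
  let s : List String × Int × String := ([], 0, "")
  let s := if oplistaRN = 1 then pvBlockA '1' "San José" s else s
  let s := if oplistaRN = 2 then pvBlockA '2' "Alajuela" s else s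
  let s := if oplistaRN = 3 then pvBlockA '3' "Cartago" s else s
  let s := if oplistaRN = 4 then pvBlockA '4' "Heredia" s else s
  let s := if oplistaRN = 5 then pvBlockA '5' "Guanacaste" s else s
  let s := if oplistaRN = 6 then pvBlockA '6' "Puntarenas" s else s
  let s := if oplistaRN = 7 then pvBlockA '7' "Limón" s else s
  let s := if oplistaRN = 8 then pvBlockA '8' "nacionalizados o naturalizados" s else s
  let s := if oplistaRN = 9 then pvBlockA '9' "de partida especial de nacimientos" s else s
  s

-- ===== PORT B =====
def pvProvincias : PySem.Dict Int String := PySem.Dict.ofList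
  [(1, "San José"), (2, "Alajuela"), (3, "Cartago"), (4, "Heredia"), (5, "Guanacaste"),
   (6, "Puntarenas"), (7, "Limón"), (8, "nacionalizados o naturalizados"),
   (9, "de partida especial de nacimientos")]

-- the module-level grouping loop of Source B: _BUCKETS.setdefault(ced[0], []).append(ced)
def pvBuckets : PySem.Dict String (List String) :=
  recuperadosDonantes.foldl
    (fun d ced =>
      let key := match PySem.Str.pyGet? ced 0 with
                 | some c => String.ofList [c]
                 | none => ""          -- unreachable: every cedula is nonempty
      d.insert key (d.getD key [] ++ [ced]))
    (PySem.Dict.ofList [])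

def listaRN_alt (oplistaRN : Int) : List String × Int × String :=
  let provincia := pvProvincias.getD oplistaRN ""
  if provincia ≠ "" then
    let aux := pvBuckets.getD (PySem.Int.toStr oplistaRN) []
    (aux, (aux.length : Int), provincia)
  else ([], 0, provincia)

-- ===== PRECONDITION & SPEC =====
def Spec_listaRN (oplistaRN : Int) (out : List String × Int × String) : Prop := out = listaRN_alt oplistaRN
instance (oplistaRN : Int) (out : List String × Int × String) : Decidable (Spec_listaRN oplistaRN out) := by unfold Spec_listaRN; infer_instance

-- ===== CLAIM =====
def Claim_equal_listaRN : Prop := ∀ (oplistaRN : Int), Dom_listaRN oplistaRN → Spec_listaRN oplistaRN (listaRN oplistaRN)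

-- ===== LEMMAS AND PROOFS =====

-- ===== VERDICT =====
theorem listaRN_spec : Claim_equal_listaRN := by
  intro op _
  unfold Spec_listaRN
  by_cases h1 : op = 1; · subst h1; decide
  by_cases h2 : op = 2; · subst h2; decide
  by_cases h3 : op = 3; · subst h3; decide
  by_cases h4 : op = 4; · subst h4; decide
  by_cases h5 : op = 5; · subst h5; decide
  by_cases h6 : op = 6; · subst h6; decide
  by_cases h7 : op = 7; · subst h7; decide
  by_cases h8 : op = 8; · subst h8; decide
  by_cases h9 : op = 9; · subst h9; decide
  have hp : pvProvincias = PySem.Dict.mk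
      [(1, "San José"), (2, "Alajuela"), (3, "Cartago"), (4, "Heredia"), (5, "Guanacaste"),
       (6, "Puntarenas"), (7, "Limón"), (8, "nacionalizados o naturalizados"),
       (9, "de partida especial de nacimientos")] := by decide
  simp [listaRN, listaRN_alt, hp, PySem.Dict.getD, PySem.Dict.get?,
        h1, h2, h3, h4, h5, h6, h7, h8, h9, Ne.symm h1, Ne.symm h2, Ne.symm h3, Ne.symm h4, Ne.symm h5,
        Ne.symm h6, Ne.symm h7, Ne.symm h8, Ne.symm h9]
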